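-- pv_equiv track=rewrite | github.com/AlexDurango/CovidPassport | helper.py | clearString
-- ===== SOURCE A (Python) =====
-- import string
--
-- def clearString(arg):
--
--     arg = arg.upper().strip()
--
--     for chr in arg:
--         if chr in string.whitespace:
--             arg = arg.replace(chr,'')
--
--         if chr in string.punctuation:
--             if chr == '.':
--                 arg = arg.replace(chr,'')
--             else:
--                 # Si hay un error, envia true
--                 return (True, None)
--
--     return (False, arg)
-- ===== SOURCE B (Python) =====
-- import string
--
-- def clearString(arg):
--     arg = arg.upper().strip()
--     bad = set(string.punctuation) - {'.'}
--     if any(c in bad for c in arg):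
--         return (True, None)
--     return (False, ''.join(c for c in arg if c not in string.whitespace and c != '.'))
-- ===== Notes on version B (the rewrite author's own statement) =====
-- stated objective: simpler
-- what changed: A's single loop that interleaves error-checking with repeated in-place str.replace mutation is split into two independent passes: a validation scan against the bad-punctuation set, then one filtering pass that drops whitespace and dots.
import Mathlib
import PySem

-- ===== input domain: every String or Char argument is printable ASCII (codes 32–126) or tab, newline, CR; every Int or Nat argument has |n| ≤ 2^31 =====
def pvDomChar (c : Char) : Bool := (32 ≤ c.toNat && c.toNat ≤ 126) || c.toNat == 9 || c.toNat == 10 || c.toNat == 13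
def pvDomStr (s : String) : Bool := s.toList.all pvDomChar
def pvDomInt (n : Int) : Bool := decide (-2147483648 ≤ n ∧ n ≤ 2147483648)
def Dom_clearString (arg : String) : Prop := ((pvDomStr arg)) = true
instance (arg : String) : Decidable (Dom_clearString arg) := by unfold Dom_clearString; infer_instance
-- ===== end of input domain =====

-- B replaces A's single loop (which both mutates the string via str.replace and
-- error-checks) by two separate passes: validate, then filter; objective: simpler.

-- string.whitespace
def pyWhitespace : List Char := [' ', '\t', '\n', '\r', '\x0B', '\x0C']
-- string.punctuation
def pyPunctuation : List Char := "!\"#$%&'()*+,-./:;<=>?@[\\]^_`{|}~".toList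

-- ===== PORT A =====
-- A's for-loop: it iterates over the chars of the stripped string AS IT WAS at loop
-- entry (Python's for-iterator holds the original string object), while the state
-- string s is being reassigned by str.replace
def clearStringLoop : List Char → String → Bool × Option String
  | [], s => (false, some s)
  | c :: rest, s =>
    let s1 := if pyWhitespace.contains c then PySem.Str.replace s (String.ofList [c]) "" else s
    if pyPunctuation.contains c then
      if c = '.' then clearStringLoop rest (PySem.Str.replace s1 (String.ofList [c]) "")
      else (true, none)
    else clearStringLoop rest s1

def clearString (arg : String) : Bool × Option String :=
  let a := PySem.Str.strip (PySem.Str.upper arg)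
  clearStringLoop a.toList a

-- ===== PORT B =====
def clearString_alt (arg : String) : Bool × Option String :=
  let a := PySem.Str.strip (PySem.Str.upper arg)
  let bad : PySem.Set Char := PySem.Set.diff (PySem.Set.ofList pyPunctuation) (PySem.Set.ofList ['.'])
  if a.toList.any (fun c => PySem.Set.contains bad c) then (true, none)
  else
    -- ''.join of the filtering generator = the filtered character list
    (false, some (String.ofList (a.toList.filter (fun c => !(pyWhitespace.contains c) && c ≠ '.'))))

-- ===== PRECONDITION & SPEC =====
def Spec_clearString (arg : String) (out : Bool × Option String) : Prop := out = clearString_alt arg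
instance (arg : String) (out : Bool × Option String) : Decidable (Spec_clearString arg out) := by unfold Spec_clearString; infer_instance

-- ===== CLAIM (what is proved, stated in full; the proofs are below) =====
def Claim_equal_clearString : Prop := ∀ (arg : String), Dom_clearString arg → Spec_clearString arg (clearString arg)

-- ===== LEMMAS AND PROOFS =====

-- the chars A's loop deletes from the state: whitespace or '.', and occurring in
-- the iterated list l (replace is only called on chars the loop actually meets)
def predKeep (l : List Char) (ch : Char) : Bool :=
  !((pyWhitespace.contains ch || ch = '.') && l.contains ch)

-- str.replace(c, '') removes every occurrence of the character c
theorem replace_go_filter (c : Char) (l : List Char) (fuel : Nat) (acc : List Char)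
    (h : l.length ≤ fuel) :
    PySem.Chars.replace.go [c] [] fuel l acc = acc.reverse ++ l.filter (· ≠ c) := by
  induction l generalizing fuel acc with
  | nil => cases fuel <;> simp [PySem.Chars.replace.go]
  | cons d t ih =>
    cases fuel with
    | zero => simp at h
    | succ f =>
      simp only [PySem.Chars.replace.go, List.isPrefixOf, List.filter_cons]
      by_cases hd : c = d
      · subst hd
        simp [ih f acc (by simpa using h)]
      · have hcd : (c == d) = false := by simp [hd]
        simp [hcd, ih f (d :: acc) (by simpa using h), Ne.symm hd]

theorem replace_char_toList (s : String) (c : Char) :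
    (PySem.Str.replace s (String.ofList [c]) "").toList = s.toList.filter (· ≠ c) := by
  rw [PySem.Str.toList_replace]
  have h1 : (String.ofList [c]).toList = [c] := String.toList_ofList
  have h2 : ("" : String).toList = ([] : List Char) := rfl
  rw [h1, h2, PySem.Chars.replace]
  rw [if_neg (by simp : ¬(([c] : List Char).isEmpty = true))]
  exact replace_go_filter c s.toList s.toList.length [] le_rfl

theorem filter_predKeep_cons_remove (c : Char) (rest : List Char) (xs : List Char)
    (h : (pyWhitespace.contains c || c = '.') = true) :
    (xs.filter (· ≠ c)).filter (predKeep rest) = xs.filter (predKeep (c :: rest)) := by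
  rw [List.filter_filter]
  apply List.filter_congr
  intro x _
  by_cases hx : x = c
  · subst hx
    simp only [predKeep]
    simp at h ⊢
    tauto
  · simp [predKeep, hx]
theorem filter_predKeep_cons_keep (c : Char) (rest : List Char) (xs : List Char)
    (h : (pyWhitespace.contains c || c = '.') = false) :
    xs.filter (predKeep rest) = xs.filter (predKeep (c :: rest)) := by
  apply List.filter_congr
  intro x _
  by_cases hx : x = c
  · subst hx
    simp only [predKeep]
    simp at h ⊢
    tauto
  · simp [predKeep, hx]
theorem loop_spec (l : List Char) (s : String) :
    clearStringLoop l s =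
      if l.any (fun c => pyPunctuation.contains c && !(c == '.')) then (true, none)
      else (false, some (String.ofList (s.toList.filter (predKeep l)))) := by
  induction l generalizing s with
  | nil =>
    have h : ∀ ch, predKeep [] ch = true := by intro ch; simp [predKeep]
    simp [clearStringLoop, List.filter_eq_self.mpr (fun a _ => h a), String.ofList_toList]
  | cons c rest ih =>
    simp only [clearStringLoop, List.any_cons]
    by_cases hp : pyPunctuation.contains c = true
    · by_cases hd : c = '.'
      · subst hd
        have hw : pyWhitespace.contains '.' = false := by decide
        have hhead : (pyPunctuation.contains '.' && !('.' == '.')) = false := by decide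
        rw [ih]
        simp only [hhead, Bool.false_or]
        simp only [hp, hw, if_true, Bool.false_eq_true, if_false]
        by_cases hb : rest.any (fun c => pyPunctuation.contains c && !(c == '.')) = true
        · rw [if_pos hb, if_pos hb]
        · rw [if_neg hb, if_neg hb, replace_char_toList,
            filter_predKeep_cons_remove '.' rest s.toList (by decide)]
      · have hhead : (pyPunctuation.contains c && !(c == '.')) = true := by
          simp [hd, List.contains_iff_mem.mp hp]
        simp only [hhead, Bool.true_or]
        simp only [hp, if_true]
        rw [if_neg hd]
    · have hp' : pyPunctuation.contains c = false := by simpa using hp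
      have hhead : (pyPunctuation.contains c && !(c == '.')) = false := by rw [hp']; simp
      simp only [hhead, Bool.false_or]
      simp only [hp', Bool.false_eq_true, if_false]
      by_cases hw : pyWhitespace.contains c = true
      · rw [if_pos hw, ih]
        by_cases hb : rest.any (fun c => pyPunctuation.contains c && !(c == '.')) = true
        · rw [if_pos hb, if_pos hb]
        · rw [if_neg hb, if_neg hb, replace_char_toList,
            filter_predKeep_cons_remove c rest s.toList (by simp [List.contains_iff_mem.mp hw])]
      · have hw' : pyWhitespace.contains c = false := by simpa using hw
        rw [if_neg hw, ih]
        by_cases hb : rest.any (fun c => pyPunctuation.contains c && !(c == '.')) = true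
        · rw [if_pos hb, if_pos hb]
        · have hdot : ¬ c = '.' := fun h => by subst h; simp [pyPunctuation] at hp'
          have hcm : c ∉ pyWhitespace := by simpa using hw'
          have hwd : (pyWhitespace.contains c || c = '.') = false := by simp [hcm, hdot]
          rw [if_neg hb, if_neg hb, filter_predKeep_cons_keep c rest s.toList hwd]

-- B's bad-set membership is exactly "punctuation other than '.'"
theorem badset_contains (c : Char) :
    PySem.Set.contains
      (PySem.Set.diff (PySem.Set.ofList pyPunctuation) (PySem.Set.ofList ['.'])) c
      = (pyPunctuation.contains c && !(c == '.')) := by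
  rw [Bool.eq_iff_iff]
  simp [PySem.Set.mem_diff]

-- ===== VERDICT (by name: the statement is the Claim_ definition above) =====
theorem clearString_spec : Claim_equal_clearString := by
  intro arg _
  show clearString arg = clearString_alt arg
  unfold clearString clearString_alt
  rw [loop_spec]
  simp only [badset_contains]
  by_cases hb : (PySem.Str.strip (PySem.Str.upper arg)).toList.any
      (fun c => pyPunctuation.contains c && !(c == '.')) = true
  · rw [if_pos hb, if_pos hb]
  · rw [if_neg hb, if_neg hb]
    have hfil : (PySem.Str.strip (PySem.Str.upper arg)).toList.filter
        (predKeep (PySem.Str.strip (PySem.Str.upper arg)).toList)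
        = (PySem.Str.strip (PySem.Str.upper arg)).toList.filter
          (fun c => !(pyWhitespace.contains c) && c ≠ '.') := by
      apply List.filter_congr
      intro x hx
      have hx' : x ∈ PySem.Chars.strip (PySem.Chars.upper arg.toList) := by simpa using hx
      simp [predKeep, hx']
    rw [hfil]
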